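-- pv_equiv track=rewrite | github.com/Ddhjx-code/music_agent | core/midi_to_abc.py | _dur_to_abc
-- ===== SOURCE A (Python) =====
-- def _dur_to_abc(units: int, pitch_str: str, is_rest: bool = False) -> str:
--     """Convert duration in 1/16-note units to unambiguous ABC notation.
--
--     With L:1/16:  4=quarter, 2=eighth, 8=half, 16=whole.
--     Non-standard durations are split into tied notes.
--     E.g. 5 sixteenths = pitch4 + pitch1 (quarter tied to sixteenth).
--
--     This avoids the ambiguity where abc2midi interprets `c5` as C-octave-5
--     rather than C with duration 5.
--     """
--     if units <= 0:
--         return 'z'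
--
--     # Standard ABC duration values at L:1/16 (all unambiguous)
--     # 1=sixteenth(/2), 2=eighth, 3=dotted-eighth(3/2), 4=quarter(2),
--     # 6=dotted-quarter(3), 8=half(4), 12=dotted-half(6), 16=whole(8)
--     def _single(u, p, rest):
--         base = 'z' if rest else p
--         return {
--             1: base + '/2', 2: base, 3: base + '3/2', 4: base + '2',
--             6: base + '3', 8: base + '4', 12: base + '6', 16: base + '8',
--         }.get(u, f'{base}{u}')
--
--     # Always split into standard durations
--     parts = []
--     remaining = units
--     while remaining > 0:
--         if remaining >= 16:
--             parts.append(_single(16, pitch_str, is_rest)); remaining -= 16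
--         elif remaining >= 12:
--             parts.append(_single(12, pitch_str, is_rest)); remaining -= 12
--         elif remaining >= 8:
--             parts.append(_single(8, pitch_str, is_rest)); remaining -= 8
--         elif remaining >= 6:
--             parts.append(_single(6, pitch_str, is_rest)); remaining -= 6
--         elif remaining >= 4:
--             parts.append(_single(4, pitch_str, is_rest)); remaining -= 4
--         elif remaining >= 3:
--             parts.append(_single(3, pitch_str, is_rest)); remaining -= 3
--         elif remaining >= 2:
--             parts.append(_single(2, pitch_str, is_rest)); remaining -= 2
--         else:
--             parts.append(_single(1, pitch_str, is_rest)); remaining -= 1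
--
--     return '-'.join(parts)
-- ===== SOURCE B (Python) =====
-- # Closed form: q = units//16 whole notes, plus a precomputed tied pattern for units%16.
-- _SUFFIX = {16: '8', 12: '6', 8: '4', 6: '3', 4: '2', 3: '3/2', 2: '', 1: '/2'}
-- _REM = ([], [1], [2], [3], [4], [4, 1], [6], [6, 1],
--         [8], [8, 1], [8, 2], [8, 3], [12], [12, 1], [12, 2], [12, 3])
--
-- def _dur_to_abc(units: int, pitch_str: str, is_rest: bool = False) -> str:
--     if units <= 0:
--         return 'z'
--     base = 'z' if is_rest else pitch_str
--     q, r = divmod(units, 16)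
--     durs = [16] * q + list(_REM[r])
--     return '-'.join(base + _SUFFIX[d] for d in durs)
-- ===== Notes on version B (the rewrite author's own statement) =====
-- stated objective: alternative
-- what changed: Replaces A's repeated-subtraction while-loop with its eight-branch threshold ladder by a closed form: units//16 whole notes plus a precomputed 16-entry lookup table of tied patterns for units%16 (no greedy loop over denominations at all).
import Mathlib
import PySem

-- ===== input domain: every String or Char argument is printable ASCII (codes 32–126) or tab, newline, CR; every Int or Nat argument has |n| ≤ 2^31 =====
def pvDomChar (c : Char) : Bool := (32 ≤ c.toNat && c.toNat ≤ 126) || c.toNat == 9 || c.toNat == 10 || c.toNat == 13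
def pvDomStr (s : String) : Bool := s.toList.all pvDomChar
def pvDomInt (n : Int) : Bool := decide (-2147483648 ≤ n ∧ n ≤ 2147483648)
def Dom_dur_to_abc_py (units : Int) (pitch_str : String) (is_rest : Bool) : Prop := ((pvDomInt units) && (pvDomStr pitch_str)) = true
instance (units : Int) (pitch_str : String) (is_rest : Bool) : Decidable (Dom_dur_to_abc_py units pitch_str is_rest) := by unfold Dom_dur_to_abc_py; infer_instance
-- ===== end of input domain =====

-- B replaces A's greedy repeated-subtraction loop by a closed form: units//16 whole
-- notes plus a precomputed 16-entry table of tied patterns for units%16 (objective: alternative).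

-- ===== PORT A =====
-- A's `_single` helper (dict .get with f-string default, ported as a match ladder)
def pvSingle (u : Int) (p : String) (rest : Bool) : String :=
  let base := if rest then "z" else p
  if u = 1 then base ++ "/2"
  else if u = 2 then base
  else if u = 3 then base ++ "3/2"
  else if u = 4 then base ++ "2"
  else if u = 6 then base ++ "3"
  else if u = 8 then base ++ "4"
  else if u = 12 then base ++ "6"
  else if u = 16 then base ++ "8"
  else base ++ PySem.Int.toStr u

-- A's while-loop collecting `parts`
def pvLoopA (remaining : Int) (pitch_str : String) (is_rest : Bool) : List String :=
  if h : remaining > 0 then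
    if remaining ≥ 16 then pvSingle 16 pitch_str is_rest :: pvLoopA (remaining - 16) pitch_str is_rest
    else if remaining ≥ 12 then pvSingle 12 pitch_str is_rest :: pvLoopA (remaining - 12) pitch_str is_rest
    else if remaining ≥ 8 then pvSingle 8 pitch_str is_rest :: pvLoopA (remaining - 8) pitch_str is_rest
    else if remaining ≥ 6 then pvSingle 6 pitch_str is_rest :: pvLoopA (remaining - 6) pitch_str is_rest
    else if remaining ≥ 4 then pvSingle 4 pitch_str is_rest :: pvLoopA (remaining - 4) pitch_str is_rest
    else if remaining ≥ 3 then pvSingle 3 pitch_str is_rest :: pvLoopA (remaining - 3) pitch_str is_rest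
    else if remaining ≥ 2 then pvSingle 2 pitch_str is_rest :: pvLoopA (remaining - 2) pitch_str is_rest
    else pvSingle 1 pitch_str is_rest :: pvLoopA (remaining - 1) pitch_str is_rest
  else []
termination_by remaining.toNat
decreasing_by all_goals omega

def dur_to_abc_py (units : Int) (pitch_str : String) (is_rest : Bool) : String :=
  if units ≤ 0 then "z"
  else PySem.Str.join "-" (pvLoopA units pitch_str is_rest)

-- ===== PORT B =====
-- B's module-level _SUFFIX dict (duration -> ABC length suffix)
def pvSuffix : PySem.Dict Int String :=
  PySem.Dict.ofList [((16:Int), "8"), (12, "6"), (8, "4"), (6, "3"), (4, "2"), (3, "3/2"), (2, ""), (1, "/2")]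

-- B's module-level _REM tuple: tied pattern for each remainder 0..15
def pvRem : List (List Int) :=
  [[], [1], [2], [3], [4], [4, 1], [6], [6, 1],
   [8], [8, 1], [8, 2], [8, 3], [12], [12, 1], [12, 2], [12, 3]]

def dur_to_abc_py_alt (units : Int) (pitch_str : String) (is_rest : Bool) : String :=
  if units ≤ 0 then "z"
  else
    let base := if is_rest then "z" else pitch_str
    let q := PySem.Int.floordiv units 16
    let r := PySem.Int.mod units 16
    -- _REM[r]: r = units % 16 ∈ [0,16) here, so the index is always in range and
    -- _SUFFIX covers every emitted duration; the .getD defaults are unreachable.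
    let durs := List.replicate q.toNat (16:Int) ++ (PySem.List.pyGet? pvRem r).getD []
    PySem.Str.join "-" (durs.map (fun d => base ++ pvSuffix.getD d ""))

-- ===== PRECONDITION & SPEC =====
def Spec_dur_to_abc_py (units : Int) (pitch_str : String) (is_rest : Bool) (out : String) : Prop := out = dur_to_abc_py_alt units pitch_str is_rest
instance (units : Int) (pitch_str : String) (is_rest : Bool) (out : String) : Decidable (Spec_dur_to_abc_py units pitch_str is_rest out) := by unfold Spec_dur_to_abc_py; infer_instance

-- ===== CLAIM =====
def Claim_equal_dur_to_abc_py : Prop := ∀ (units : Int) (pitch_str : String) (is_rest : Bool), Dom_dur_to_abc_py units pitch_str is_rest → Spec_dur_to_abc_py units pitch_str is_rest (dur_to_abc_py units pitch_str is_rest)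

-- ===== LEMMAS AND PROOFS =====

-- B's token for duration d equals A's `_single` on the durations B emits.
theorem tok_eq (p : String) (b : Bool) (d : Int)
    (hd : d = 1 ∨ d = 2 ∨ d = 3 ∨ d = 4 ∨ d = 6 ∨ d = 8 ∨ d = 12 ∨ d = 16) :
    (if b then "z" else p) ++ pvSuffix.getD d "" = pvSingle d p b := by
  rcases hd with h | h | h | h | h | h | h | h <;> subst h <;>
    simp [pvSuffix, pvSingle, PySem.Dict.getD, PySem.Dict.get?, PySem.Dict.ofList,
      PySem.Dict.empty, PySem.Dict.update, PySem.Dict.insert, List.find?]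

-- B's string list, as a function of the remaining duration.
def pvListB (r : Int) (p : String) (b : Bool) : List String :=
  (List.replicate (PySem.Int.floordiv r 16).toNat (16:Int)
      ++ (PySem.List.pyGet? pvRem (PySem.Int.mod r 16)).getD []).map
    (fun d => (if b then "z" else p) ++ pvSuffix.getD d "")

-- Peeling one 16 off B's closed form.
theorem pvListB_step16 (r : Int) (hr : r ≥ 16) (p : String) (b : Bool) :
    pvListB r p b = ((if b then "z" else p) ++ pvSuffix.getD 16 "") :: pvListB (r - 16) p b := by
  have hpos : (0:Int) < 16 := by norm_num
  have h2 : PySem.Int.mod r 16 = PySem.Int.mod (r - 16) 16 := by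
    rw [PySem.Int.mod_eq_emod_of_pos hpos, PySem.Int.mod_eq_emod_of_pos hpos]; omega
  have h3 : (PySem.Int.floordiv r 16).toNat = (PySem.Int.floordiv (r - 16) 16).toNat + 1 := by
    rw [PySem.Int.floordiv_eq_ediv_of_pos hpos, PySem.Int.floordiv_eq_ediv_of_pos hpos]; omega
  unfold pvListB
  rw [h2, h3, List.replicate_succ]
  rfl

-- The core equivalence: A's greedy loop produces exactly B's closed-form list.
theorem loopA_eq_listB (r : Int) (hr : 0 ≤ r) (p : String) (b : Bool) :
    pvLoopA r p b = pvListB r p b := by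
  by_cases h16 : r ≥ 16
  · rw [pvListB_step16 r h16 p b, pvLoopA, dif_pos (show r > 0 by omega), if_pos h16,
        loopA_eq_listB (r - 16) (by omega) p b,
        tok_eq p b 16 (by tauto)]
  · interval_cases r <;>
      simp [pvLoopA, pvListB, pvSingle, pvSuffix, pvRem, PySem.Int.floordiv, PySem.Int.mod,
        PySem.List.pyGet?, PySem.List.pyIdx?, PySem.Dict.getD, PySem.Dict.get?,
        PySem.Dict.ofList, PySem.Dict.empty, PySem.Dict.update, PySem.Dict.insert, List.find?]
termination_by r.toNat
decreasing_by omega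

-- ===== VERDICT =====
theorem dur_to_abc_py_spec : Claim_equal_dur_to_abc_py := by
  intro units pitch_str is_rest _
  unfold Spec_dur_to_abc_py dur_to_abc_py dur_to_abc_py_alt
  by_cases h : units ≤ 0
  · simp [h]
  · simp only [h, if_false]
    rw [loopA_eq_listB units (by omega) pitch_str is_rest]
    rfl
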